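-- pv_equiv track=rewrite | github.com/vklikar/advent-of-code-2023 | advent_of_code_2023/day05.py | dfs_range
-- ===== SOURCE A (Python) =====
-- def get_destination(parsed_data, src):
--     return next(mapping[1] for mapping in parsed_data if mapping[0] == src)
--
-- def dfs_range(parsed_data, src, x):
--     dst = get_destination(parsed_data, src)
--     ys = []
--     for dst_start, src_start, length in parsed_data[(src, dst)]:
--         src_end = src_start + length - 1
--         dst_end = dst_start + length - 1
--
--         if src_start < x[1] and x[0] < src_end:
--             diff_start = max(0, x[0] - src_start)
--             diff_end = max(0, src_end - x[1])
--             ys.append((dst_start + diff_start, dst_end - diff_end))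
--
--     if not ys:
--         ys.append(x)
--
--     return min([y[0] for y in ys] if dst == "location" else [dfs_range(parsed_data, dst, y) for y in ys])
-- ===== SOURCE B (Python) =====
-- def dfs_range(parsed_data, src, x):
--     # Two staged passes instead of recursion: first collect the chain of range
--     # tables from src down to "location", then push the interval set through
--     # each table in turn and take a single min at the end.
--     chain = []
--     while True:
--         dst = next(m[1] for m in parsed_data if m[0] == src)
--         chain.append(parsed_data[(src, dst)])
--         if dst == "location":
--             break
--         src = dst
--     frontier = [x]
--     for ranges in chain:
--         nxt = []
--         for lo, hi in frontier:
--             ys = [(d - s + max(lo, s), d - s + min(hi, s + l - 1))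
--                   for d, s, l in ranges if s < hi and lo < s + l - 1]
--             nxt += ys or [(lo, hi)]
--         frontier = nxt
--     return min(lo for lo, _ in frontier)
-- ===== Notes on version B (the rewrite author's own statement) =====
-- stated objective: alternative
-- what changed: Replaces the per-interval recursion over the category chain (with a min at every level) by two staged passes: first collect the chain of range tables from src to 'location', then fold the whole frontier of intervals through the chain with comprehension-style clipping (clamp-to-overlap plus offset) and one final min.
import Mathlib
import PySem

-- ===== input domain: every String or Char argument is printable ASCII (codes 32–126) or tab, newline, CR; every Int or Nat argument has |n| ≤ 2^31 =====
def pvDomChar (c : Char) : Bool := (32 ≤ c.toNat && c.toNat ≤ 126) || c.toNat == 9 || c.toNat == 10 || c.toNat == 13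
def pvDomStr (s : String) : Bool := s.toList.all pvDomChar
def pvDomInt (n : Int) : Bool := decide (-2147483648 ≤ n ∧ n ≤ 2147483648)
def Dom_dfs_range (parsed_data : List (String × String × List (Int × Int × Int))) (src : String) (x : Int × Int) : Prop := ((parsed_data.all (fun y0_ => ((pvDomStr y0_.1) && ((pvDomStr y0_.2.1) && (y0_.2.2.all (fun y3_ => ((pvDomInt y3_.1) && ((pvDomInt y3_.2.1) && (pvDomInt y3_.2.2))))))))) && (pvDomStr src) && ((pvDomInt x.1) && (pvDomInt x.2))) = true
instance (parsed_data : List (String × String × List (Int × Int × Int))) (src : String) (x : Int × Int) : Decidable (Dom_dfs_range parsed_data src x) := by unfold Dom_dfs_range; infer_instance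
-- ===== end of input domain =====

-- B replaces A's per-interval recursion over the category chain (min at every level) by two
-- staged passes: collect the chain of range tables first, then fold the whole interval frontier
-- through the chain, taking one final min; clipping is written as clamp-to-overlap plus offset.
-- Both ports run on fuel parsed_data.length + 1; Pre_ guarantees the Python programs terminate
-- within that depth (see Pre_ comment).

-- ===== PORT A =====
-- 'next(mapping[1] for mapping in parsed_data if mapping[0] == src)' (None = StopIteration)
def pvGetDestA (parsed_data : List (String × String × List (Int × Int × Int))) (src : String) : Option String :=
  (parsed_data.find? (fun m => m.1 == src)).map (fun m => m.2.1)

-- 'parsed_data[(src, dst)]' dict lookup (first match; Pre_ keeps keys distinct); [] unreachable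
def pvRangesA (parsed_data : List (String × String × List (Int × Int × Int))) (src dst : String) : List (Int × Int × Int) :=
  ((parsed_data.find? (fun m => m.1 == src && m.2.1 == dst)).map (fun m => m.2.2)).getD []

-- Python 'min' of a nonempty int list; [] unreachable in both ports
def pvMinA : List Int → Int
  | [] => 0
  | h :: t => t.foldl min h

-- fuel = recursion depth bound; Pre_ guarantees parsed_data.length + 1 suffices for Python A
def dfs_range_go (fuel : Nat) (parsed_data : List (String × String × List (Int × Int × Int))) (src : String) (x : Int × Int) : Int :=
  match fuel with
  | 0 => 0
  | fuel + 1 =>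
    match pvGetDestA parsed_data src with
    | none => 0
    | some dst =>
      let ys := (pvRangesA parsed_data src dst).foldl (fun ys t =>
        let src_end := t.2.1 + t.2.2 - 1
        let dst_end := t.1 + t.2.2 - 1
        if t.2.1 < x.2 ∧ x.1 < src_end then
          ys ++ [(t.1 + max 0 (x.1 - t.2.1), dst_end - max 0 (src_end - x.2))]
        else ys) []
      let ys := if ys = [] then [x] else ys
      if dst = "location" then pvMinA (ys.map (fun y => y.1))
      else pvMinA (ys.map (fun y => dfs_range_go fuel parsed_data dst y))

def dfs_range (parsed_data : List (String × String × List (Int × Int × Int))) (src : String) (x : Int × Int) : Int :=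
  dfs_range_go (parsed_data.length + 1) parsed_data src x

-- ===== PORT B =====
-- stage 1: the chain of range tables from src down to (and including) the map into "location";
-- none = the while loop would not terminate within the fuel / a key is missing
def pvChain (fuel : Nat) (parsed_data : List (String × String × List (Int × Int × Int))) (src : String) : Option (List (List (Int × Int × Int))) :=
  match fuel with
  | 0 => none
  | fuel + 1 =>
    match parsed_data.find? (fun m => m.1 == src) with
    | none => none
    | some m =>
      let dst := m.2.1
      let ranges := ((parsed_data.find? (fun m => m.1 == src && m.2.1 == dst)).map (fun m => m.2.2)).getD []
      if dst = "location" then some [ranges]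
      else (pvChain fuel parsed_data dst).map (fun rest => ranges :: rest)

-- clip one interval through one table: list comprehension with clamp+offset, empty fallback
def pvClipB (ranges : List (Int × Int × Int)) (y : Int × Int) : List (Int × Int) :=
  let ys := (ranges.filter (fun t => decide (t.2.1 < y.2 ∧ y.1 < t.2.1 + t.2.2 - 1))).map
    (fun t => (t.1 - t.2.1 + max y.1 t.2.1, t.1 - t.2.1 + min y.2 (t.2.1 + t.2.2 - 1)))
  if ys = [] then [y] else ys

-- stage 2 inner loop: 'nxt += ys or [(lo, hi)]' over the frontier
def pvStepMap (ranges : List (Int × Int × Int)) (fr : List (Int × Int)) : List (Int × Int) :=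
  fr.foldl (fun acc y => acc ++ pvClipB ranges y) []

def dfs_range_alt (parsed_data : List (String × String × List (Int × Int × Int))) (src : String) (x : Int × Int) : Int :=
  match pvChain (parsed_data.length + 1) parsed_data src with
  | none => 0
  | some chain =>
    match (chain.foldl (fun fr ranges => pvStepMap ranges fr) [x]).map (fun y => y.1) with
    | [] => 0
    | h :: t => t.foldl min h

-- ===== PRECONDITION & SPEC =====
-- one edge of the key graph: the destination category named by the first entry keyed by s
def pvNextKey (parsed_data : List (String × String × List (Int × Int × Int))) (s : String) : Option String :=
  (parsed_data.find? (fun m => m.1 == s)).map (fun m => m.2.1)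

def pvStep (parsed_data : List (String × String × List (Int × Int × Int))) (o : Option String) : Option String :=
  o.bind (pvNextKey parsed_data)

-- Pre_ excludes inputs where Python A raises (StopIteration on a missing source key,
-- RecursionError on a cyclic chain) and association lists with duplicate (src, dst) keys, on
-- which the Python dict's duplicate-key overwrite semantics cannot be represented by the
-- association-list encoding (both Python programs still agree there).
def Pre_dfs_range (parsed_data : List (String × String × List (Int × Int × Int))) (src : String) (x : Int × Int) : Prop :=
  (parsed_data.map (fun m => (m.1, m.2.1))).Nodup ∧
  ∃ n ∈ Finset.Icc 1 parsed_data.length, (pvStep parsed_data)^[n] (some src) = some "location"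

instance (parsed_data : List (String × String × List (Int × Int × Int))) (src : String) (x : Int × Int) : Decidable (Pre_dfs_range parsed_data src x) := by unfold Pre_dfs_range; infer_instance

def pvWitness_dfs_range : (List (String × String × List (Int × Int × Int))) × String × (Int × Int) :=
  ([("seed", "soil", [(10, 5, 3)]), ("soil", "location", [(0, 8, 4)])], "seed", (4, 9))

def Spec_dfs_range (parsed_data : List (String × String × List (Int × Int × Int))) (src : String) (x : Int × Int) (out : Int) : Prop := out = dfs_range_alt parsed_data src x
instance (parsed_data : List (String × String × List (Int × Int × Int))) (src : String) (x : Int × Int) (out : Int) : Decidable (Spec_dfs_range parsed_data src x out) := by unfold Spec_dfs_range; infer_instance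

-- ===== CLAIM (what is proved, stated in full; the proofs are below) =====
def Claim_equal_dfs_range : Prop := ∀ (parsed_data : List (String × String × List (Int × Int × Int))) (src : String) (x : Int × Int), Dom_dfs_range parsed_data src x → Pre_dfs_range parsed_data src x → Spec_dfs_range parsed_data src x (dfs_range parsed_data src x)

-- ===== LEMMAS AND PROOFS =====

theorem foldl_min_comm (l : List Int) (a b : Int) :
    l.foldl min (min a b) = min a (l.foldl min b) := by
  induction l generalizing b with
  | nil => rfl
  | cons h t ih =>
    simp only [List.foldl_cons]
    rw [min_assoc] at *
    exact ih (min b h)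

theorem pvMinA_append (l₁ l₂ : List Int) (h₁ : l₁ ≠ []) (h₂ : l₂ ≠ []) :
    pvMinA (l₁ ++ l₂) = min (pvMinA l₁) (pvMinA l₂) := by
  match l₁, l₂ with
  | a :: t₁, b :: t₂ =>
    show ((t₁ ++ b :: t₂).foldl min a) = min (t₁.foldl min a) (t₂.foldl min b)
    rw [List.foldl_append, List.foldl_cons]
    exact foldl_min_comm t₂ _ b

theorem pvClipB_ne_nil (ranges : List (Int × Int × Int)) (y : Int × Int) :
    pvClipB ranges y ≠ [] := by
  simp only [pvClipB]
  split
  · simp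
  · assumption

-- min over the flattened leaves equals the min of the per-interval minima
theorem pvMinA_flatMap (g : Int × Int → List Int) (frontier : List (Int × Int))
    (hf : frontier ≠ []) (hg : ∀ y, g y ≠ []) :
    pvMinA (frontier.flatMap g) = pvMinA (frontier.map (fun y => pvMinA (g y))) := by
  induction frontier with
  | nil => exact absurd rfl hf
  | cons h t ih =>
    cases t with
    | nil => simp [pvMinA]
    | cons h' t' =>
      have ht : (h' :: t').flatMap g ≠ [] := by
        simp only [List.flatMap_cons, ne_eq, List.append_eq_nil_iff, not_and]
        intro hc; exact absurd hc (hg h')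
      have := ih (by simp)
      show pvMinA (g h ++ (h' :: t').flatMap g) = pvMinA (pvMinA (g h) :: _)
      rw [pvMinA_append _ _ (hg h) ht, this]
      have : ∀ (a : Int) (l : List Int), l ≠ [] → min a (pvMinA l) = pvMinA (a :: l) := by
        intro a l hl
        match l with
        | b :: t =>
          show min a (t.foldl min b) = t.foldl min (min a b)
          rw [foldl_min_comm]
      exact this _ _ (by simp)

theorem pvMinA_const0 (l : List (Int × Int)) (hl : l ≠ []) :
    pvMinA (l.map (fun _ => (0 : Int))) = 0 := by
  match l with
  | y :: t =>
    induction t with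
    | nil => rfl
    | cons h t iht => simpa [pvMinA, List.foldl_cons] using iht (by simp)

-- A's inner fold (+fallback) builds exactly pvClipB: the clipped endpoints coincide
theorem clipA_eq (ranges : List (Int × Int × Int)) (x : Int × Int) :
    (let ys := ranges.foldl (fun ys t =>
        let src_end := t.2.1 + t.2.2 - 1
        let dst_end := t.1 + t.2.2 - 1
        if t.2.1 < x.2 ∧ x.1 < src_end then
          ys ++ [(t.1 + max 0 (x.1 - t.2.1), dst_end - max 0 (src_end - x.2))]
        else ys) [];
      if ys = [] then [x] else ys) = pvClipB ranges x := by
  unfold pvClipB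
  have : ∀ (acc : List (Int × Int)),
      ranges.foldl (fun ys t =>
        let src_end := t.2.1 + t.2.2 - 1
        let dst_end := t.1 + t.2.2 - 1
        if t.2.1 < x.2 ∧ x.1 < src_end then
          ys ++ [(t.1 + max 0 (x.1 - t.2.1), dst_end - max 0 (src_end - x.2))]
        else ys) acc
      = acc ++ (ranges.filter (fun t => decide (t.2.1 < x.2 ∧ x.1 < t.2.1 + t.2.2 - 1))).map
          (fun t => (t.1 - t.2.1 + max x.1 t.2.1, t.1 - t.2.1 + min x.2 (t.2.1 + t.2.2 - 1))) := by
    intro acc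
    induction ranges generalizing acc with
    | nil => simp
    | cons r rs ih =>
      simp only [List.foldl_cons, List.filter_cons]
      by_cases hc : r.2.1 < x.2 ∧ x.1 < r.2.1 + r.2.2 - 1
      · have hpr : ((r.1 + max 0 (x.1 - r.2.1), r.1 + r.2.2 - 1 - max 0 (r.2.1 + r.2.2 - 1 - x.2)) : Int × Int)
             = (r.1 - r.2.1 + max x.1 r.2.1, r.1 - r.2.1 + min x.2 (r.2.1 + r.2.2 - 1)) := by
          rw [Prod.mk.injEq]; constructor <;> omega
        rw [decide_eq_true hc, if_pos hc, ih, if_pos rfl, List.map_cons, hpr,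
          List.append_assoc, List.singleton_append]
      · rw [decide_eq_false hc, if_neg hc, ih, if_neg (by simp)]
  rw [this, List.nil_append]

-- if the chain collection fails (missing key / fuel out), A's recursion yields 0 everywhere
theorem chain_none (fuel : Nat) (parsed_data : List (String × String × List (Int × Int × Int))) :
    ∀ (src : String), pvChain fuel parsed_data src = none →
    ∀ y, dfs_range_go fuel parsed_data src y = 0 := by
  induction fuel with
  | zero => intro src _ y; rfl
  | succ fuel ih =>
    intro src hc y
    simp only [pvChain] at hc
    simp only [dfs_range_go, pvGetDestA]
    rcases hm : parsed_data.find? (fun m => m.1 == src) with _ | m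
    · simp [hm]
    · simp only [hm] at hc
      simp only [hm, Option.map_some]
      by_cases hloc : m.2.1 = "location"
      · rw [if_pos hloc] at hc; exact absurd hc (by simp)
      · rw [if_neg hloc] at hc
        have hrest : pvChain fuel parsed_data m.2.1 = none := by
          rcases h : pvChain fuel parsed_data m.2.1 with _ | r
          · rfl
          · rw [h] at hc; exact absurd hc (by simp)
        rw [if_neg hloc]
        rw [List.map_congr_left (fun y _ => ih m.2.1 hrest y)]
        exact pvMinA_const0 _ (by split <;> simp_all)

-- main invariant: a successful chain folded over a nonempty frontier computes the min of
-- A's recursion over that frontier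
theorem chain_some (fuel : Nat) (parsed_data : List (String × String × List (Int × Int × Int))) :
    ∀ (src : String) (ch : List (List (Int × Int × Int))),
    pvChain fuel parsed_data src = some ch →
    ∀ (frontier : List (Int × Int)), frontier ≠ [] →
    pvMinA ((ch.foldl (fun fr ranges => pvStepMap ranges fr) frontier).map (fun y => y.1))
      = pvMinA (frontier.map (fun y => dfs_range_go fuel parsed_data src y)) := by
  induction fuel with
  | zero => intro src ch hc; exact absurd hc (by simp [pvChain])
  | succ fuel ih =>
    intro src ch hc frontier hf
    simp only [pvChain] at hc
    rcases hm : parsed_data.find? (fun m => m.1 == src) with _ | m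
    · simp only [hm] at hc
      exact absurd hc (by simp)
    simp only [hm] at hc
    have hdest : pvGetDestA parsed_data src = some m.2.1 := by
      simp [pvGetDestA, hm]
    have hR : pvRangesA parsed_data src m.2.1
        = ((parsed_data.find? (fun k => k.1 == src && k.2.1 == m.2.1)).map (fun k => k.2.2)).getD [] := rfl
    have hgo : ∀ y, dfs_range_go (fuel + 1) parsed_data src y
        = (if m.2.1 = "location"
           then pvMinA ((pvClipB (pvRangesA parsed_data src m.2.1) y).map (fun z => z.1))
           else pvMinA ((pvClipB (pvRangesA parsed_data src m.2.1) y).map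
                  (fun z => dfs_range_go fuel parsed_data m.2.1 z))) := by
      intro y
      simp only [dfs_range_go, hdest]
      rw [← clipA_eq (pvRangesA parsed_data src m.2.1) y]
    have hstep : ∀ r fr, pvStepMap r fr = fr.flatMap (pvClipB r) := by
      intro r fr
      simp only [pvStepMap]
      rw [PySem.List.foldl_append_eq_flatMap, List.nil_append]
    by_cases hloc : m.2.1 = "location"
    · rw [if_pos hloc] at hc
      cases hc
      rw [List.foldl_cons, List.foldl_nil, hstep, ← hR]
      rw [List.map_flatMap,
        pvMinA_flatMap (fun y => ((pvClipB (pvRangesA parsed_data src m.2.1) y).map (fun z => z.1)))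
          frontier hf (fun y => by simp [pvClipB_ne_nil])]
      congr 1
      refine List.map_congr_left ?_
      intro y _
      rw [hgo y, if_pos hloc]
    · rw [if_neg hloc] at hc
      rcases h' : pvChain fuel parsed_data m.2.1 with _ | ch'
      · rw [h'] at hc; exact absurd hc (by simp)
      rw [h'] at hc
      cases hc
      rw [List.foldl_cons, hstep, ← hR]
      have hnx : frontier.flatMap (pvClipB (pvRangesA parsed_data src m.2.1)) ≠ [] := by
        match frontier with
        | y :: t =>
          simp only [List.flatMap_cons, ne_eq, List.append_eq_nil_iff, not_and]
          intro hcn; exact absurd hcn (pvClipB_ne_nil _ y)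
      rw [ih m.2.1 ch' h' _ hnx, List.map_flatMap,
        pvMinA_flatMap (fun y => ((pvClipB (pvRangesA parsed_data src m.2.1) y).map
          (fun z => dfs_range_go fuel parsed_data m.2.1 z))) frontier hf
          (fun y => by simp [pvClipB_ne_nil])]
      congr 1
      refine List.map_congr_left ?_
      intro y _
      rw [hgo y, if_neg hloc]

-- ===== VERDICT (by name: the statement is the Claim_ definition above) =====
theorem dfs_range_spec : Claim_equal_dfs_range := by
  intro parsed_data src x _ _
  show dfs_range parsed_data src x = dfs_range_alt parsed_data src x
  unfold dfs_range dfs_range_alt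
  rcases hc : pvChain (parsed_data.length + 1) parsed_data src with _ | ch
  · exact chain_none _ parsed_data src hc x
  · have := chain_some (parsed_data.length + 1) parsed_data src ch hc [x] (by simp)
    simp only [List.map_cons, List.map_nil] at this
    have hx : pvMinA [dfs_range_go (parsed_data.length + 1) parsed_data src x]
        = dfs_range_go (parsed_data.length + 1) parsed_data src x := rfl
    rw [hx] at this
    rw [← this]
    rfl
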